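-- pv_equiv track=rewrite | github.com/FrenchRuin/BackJooN | 프로그래머스/2/138476. 귤 고르기/귤 고르기.py | solution
-- ===== SOURCE A (Python) =====
-- def solution(k, tangerine):
--     answer = 0
--     list = {}
--     for i in tangerine :
--         if i in list :
--             list[i] += 1
--         else :
--             list[i] = 1
--     list = dict(sorted(list.items(), key=lambda x: x[1], reverse = True))
--     for i in list :
--         if k<= 0 :
--             return answer
--         k -= list[i]
--         answer += 1
--
--     return answer
-- ===== SOURCE B (Python) =====
-- def solution(k, tangerine):
--     counts = {}
--     for t in tangerine:
--         counts[t] = counts.get(t, 0) + 1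
--     freq = {}  # freq[c] = how many distinct sizes occur exactly c times
--     for c in counts.values():
--         freq[c] = freq.get(c, 0) + 1
--     answer = 0
--     for f in range(len(tangerine), 0, -1):
--         for _ in range(freq.get(f, 0)):
--             if k <= 0:
--                 return answer
--             k -= f
--             answer += 1
--     return answer
-- ===== Notes on version B (the rewrite author's own statement) =====
-- stated objective: alternative
-- what changed: B replaces A's comparison sort of the count-dict items by a frequency-of-frequency table (a counting-sort index) swept from the highest possible count down to 1, taking freq[f] type-blocks per frequency.
import Mathlib
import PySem

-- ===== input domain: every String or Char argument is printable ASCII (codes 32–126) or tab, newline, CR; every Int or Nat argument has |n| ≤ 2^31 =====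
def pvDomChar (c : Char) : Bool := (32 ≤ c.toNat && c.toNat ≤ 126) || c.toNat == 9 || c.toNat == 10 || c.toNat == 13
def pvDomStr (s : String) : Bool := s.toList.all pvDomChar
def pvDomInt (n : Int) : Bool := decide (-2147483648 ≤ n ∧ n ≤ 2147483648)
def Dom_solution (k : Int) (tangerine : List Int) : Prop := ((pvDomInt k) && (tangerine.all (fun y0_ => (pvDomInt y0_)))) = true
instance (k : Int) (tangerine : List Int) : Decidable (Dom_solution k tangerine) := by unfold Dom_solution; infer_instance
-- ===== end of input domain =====

-- B replaces A's comparison sort of the count dict by a frequency-of-frequency table swept from the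
-- highest possible count downwards (objective: alternative decomposition, no comparison sort).

-- ===== PORT A =====
-- A's second loop: 'for i in list: if k <= 0: return answer; k -= list[i]; answer += 1'
-- ('list[i]' is ported as getD _ 0: every key iterated comes from the dict itself, so no KeyError).
def solutionLoopA (d : PySem.Dict Int Int) (ks : List Int) (k answer : Int) : Int :=
  match ks with
  | [] => answer
  | i :: rest =>
      if k ≤ 0 then answer
      else solutionLoopA d rest (k - d.getD i 0) (answer + 1)

def solution (k : Int) (tangerine : List Int) : Int :=
  let d : PySem.Dict Int Int :=
    tangerine.foldl (fun d i =>
      if d.contains i then d.insert i (d.getD i 0 + 1) else d.insert i 1) PySem.Dict.empty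
  let d2 : PySem.Dict Int Int := PySem.Dict.ofList (PySem.List.sorted d.items (fun x => x.2) true)
  solutionLoopA d2 d2.keys k 0

-- ===== PORT B =====
-- inner 'for _ in range(freq.get(f, 0)): if k <= 0: return answer; k -= f; answer += 1'
-- (.inl = early 'return answer', .inr = state (k, answer) when the inner loop finishes)
def solutionInnerB (f : Int) (it : List Int) (k answer : Int) : Int ⊕ (Int × Int) :=
  match it with
  | [] => .inr (k, answer)
  | _ :: rest => if k ≤ 0 then .inl answer else solutionInnerB f rest (k - f) (answer + 1)

-- outer 'for f in range(len(tangerine), 0, -1): …'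
def solutionOuterB (freq : PySem.Dict Int Int) (fs : List Int) (k answer : Int) : Int :=
  match fs with
  | [] => answer
  | f :: rest =>
      match solutionInnerB f (PySem.List.pyRange 0 (freq.getD f 0) 1) k answer with
      | .inl a => a
      | .inr (k', ans') => solutionOuterB freq rest k' ans'

def solution_alt (k : Int) (tangerine : List Int) : Int :=
  let counts : PySem.Dict Int Int :=
    tangerine.foldl (fun d t => d.insert t (d.getD t 0 + 1)) PySem.Dict.empty
  let freq : PySem.Dict Int Int :=
    counts.values.foldl (fun d c => d.insert c (d.getD c 0 + 1)) PySem.Dict.empty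
  solutionOuterB freq (PySem.List.pyRange (tangerine.length : Int) 0 (-1)) k 0

-- ===== PRECONDITION & SPEC =====
def Spec_solution (k : Int) (tangerine : List Int) (out : Int) : Prop := out = solution_alt k tangerine
instance (k : Int) (tangerine : List Int) (out : Int) : Decidable (Spec_solution k tangerine out) := by unfold Spec_solution; infer_instance

-- ===== CLAIM (what is proved, stated in full; the proofs are below) =====
def Claim_equal_solution : Prop := ∀ (k : Int) (tangerine : List Int), Dom_solution k tangerine → Spec_solution k tangerine (solution k tangerine)

-- ===== LEMMAS AND PROOFS =====

-- The common greedy core: take frequencies left to right until k is exhausted, count how many were taken.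
def pvGreedy (k answer : Int) (fs : List Int) : Int :=
  match fs with
  | [] => answer
  | f :: rest => if k ≤ 0 then answer else pvGreedy (k - f) (answer + 1) rest

-- A's key loop, read through the items list of the dict it iterates.
theorem solutionLoopA_eq_pvGreedy (d : PySem.Dict Int Int) (prs : List (Int × Int))
    (hget : ∀ p ∈ prs, d.getD p.1 0 = p.2) (k answer : Int) :
    solutionLoopA d (prs.map (·.1)) k answer = pvGreedy k answer (prs.map (·.2)) := by
  induction prs generalizing k answer with
  | nil => rfl
  | cons p rest ih =>
      simp only [List.map_cons, solutionLoopA, pvGreedy,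
        hget p (List.mem_cons_self ..)]
      split_ifs with h
      · rfl
      · exact ih (fun q hq => hget q (List.mem_cons_of_mem _ hq)) _ _

-- B's inner loop is the greedy core run over a block of it.length copies of f.
theorem solutionInnerB_greedy (f : Int) (it rest : List Int) (k answer : Int) :
    (match solutionInnerB f it k answer with
      | .inl a => a
      | .inr (k', ans') => pvGreedy k' ans' rest) =
    pvGreedy k answer (List.replicate it.length f ++ rest) := by
  induction it generalizing k answer with
  | nil => rfl
  | cons _ t ih =>
      simp only [solutionInnerB, List.length_cons, List.replicate_succ, List.cons_append, pvGreedy]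
      split_ifs with h
      · rfl
      · exact ih _ _

-- B's outer loop is the greedy core over the concatenation of the frequency blocks.
theorem solutionOuterB_eq_pvGreedy (freq : PySem.Dict Int Int) (fs : List Int) (k answer : Int) :
    solutionOuterB freq fs k answer =
      pvGreedy k answer (fs.flatMap fun f => List.replicate (freq.getD f 0).toNat f) := by
  induction fs generalizing k answer with
  | nil => rfl
  | cons f rest ih =>
      simp only [solutionOuterB, List.flatMap_cons]
      have hlen : (PySem.List.pyRange 0 (freq.getD f 0) 1).length = (freq.getD f 0).toNat := by
        simp [PySem.List.length_pyRange_one]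
      rw [← hlen, ← solutionInnerB_greedy f (PySem.List.pyRange 0 (freq.getD f 0) 1)
        (rest.flatMap fun f => List.replicate (freq.getD f 0).toNat f) k answer]
      cases hin : solutionInnerB f (PySem.List.pyRange 0 (freq.getD f 0) 1) k answer with
      | inl a => rfl
      | inr st => cases st; simp [ih]

-- counting-sort facts -------------------------------------------------------

theorem count_flatMap_replicate (fs : List Int) (g : Int → Nat) (hnd : fs.Nodup) (a : Int) :
    (fs.flatMap fun f => List.replicate (g f) f).count a = if a ∈ fs then g a else 0 := by
  induction fs with
  | nil => simp
  | cons f rest ih =>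
      rcases List.nodup_cons.mp hnd with ⟨hf, hrest⟩
      simp only [List.flatMap_cons, List.count_append, ih hrest, List.count_replicate]
      by_cases hafs : a = f
      · subst hafs
        simp [hf]
      · simp [List.mem_cons, hafs, beq_iff_eq, Ne.symm hafs]

theorem perm_flatMap_replicate (fs cs : List Int) (hnd : fs.Nodup)
    (hmem : ∀ c ∈ cs, c ∈ fs) :
    (fs.flatMap fun f => List.replicate (cs.count f) f).Perm cs := by
  rw [List.perm_iff_count]
  intro a
  rw [count_flatMap_replicate fs _ hnd a]
  by_cases ha : a ∈ fs
  · simp [ha]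
  · have : a ∉ cs := fun hc => ha (hmem a hc)
    simp [ha, List.count_eq_zero_of_not_mem this]

theorem mem_flatMap_replicate {fs : List Int} {g : Int → Nat} {x : Int}
    (hx : x ∈ fs.flatMap fun f => List.replicate (g f) f) : x ∈ fs := by
  rcases List.mem_flatMap.mp hx with ⟨f, hf, hxf⟩
  rw [List.eq_of_mem_replicate hxf]
  exact hf

theorem pairwise_flatMap_replicate (fs : List Int) (g : Int → Nat)
    (hp : fs.Pairwise (fun a b => b < a)) :
    (fs.flatMap fun f => List.replicate (g f) f).Pairwise (fun a b => b ≤ a) := by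
  induction fs with
  | nil => simp
  | cons f rest ih =>
      rcases List.pairwise_cons.mp hp with ⟨hf, hrest⟩
      simp only [List.flatMap_cons]
      apply List.pairwise_append.mpr
      refine ⟨List.pairwise_replicate.mpr (Or.inr le_rfl), ih hrest, ?_⟩
      intro a ha b hb
      rw [List.eq_of_mem_replicate ha]
      exact le_of_lt (hf b (mem_flatMap_replicate hb))

theorem pairwise_gt_pyRange_countdown (n : Int) :
    (PySem.List.pyRange n 0 (-1)).Pairwise (fun a b => b < a) := by
  rw [PySem.List.pyRange_neg_one_eq_reverse]
  exact List.pairwise_reverse.mpr (PySem.List.pairwise_lt_pyRange_one 1 (n + 1))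

-- the two dicts -------------------------------------------------------------

theorem foldA_eq_counter (tangerine : List Int) :
    tangerine.foldl (fun d i =>
        if d.contains i then d.insert i (d.getD i 0 + 1) else d.insert i 1)
      PySem.Dict.empty = PySem.Dict.counter tangerine := by
  have hfun : (fun (d : PySem.Dict Int Int) i =>
      if d.contains i then d.insert i (d.getD i 0 + 1) else d.insert i 1) =
      fun d i => d.insert i (d.getD i 0 + 1) := by
    funext d i
    by_cases h : d.contains i
    · simp [h]
    · rw [if_neg (by simp [h]), PySem.Dict.getD_of_not_contains d 0 (Bool.eq_false_iff.mpr h)]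
      norm_num
  rw [hfun, PySem.Dict.foldl_insert_getD_add_one_eq_counter]

-- dict(sorted(counter.items(), …)) keeps exactly the sorted pairs as its items.
theorem items_ofList_of_nodup_fst (prs : List (Int × Int)) (hnd : (prs.map (·.1)).Nodup) :
    (PySem.Dict.ofList prs).items = prs := by
  have := PySem.Dict.items_foldl_insert_fresh prs (·.1) (·.2) (PySem.Dict.empty (κ := Int) (ν := Int))
    (fun a _ => PySem.Dict.contains_empty a.1) hnd
  simpa [PySem.Dict.ofList, PySem.Dict.update] using this

-- every count of an element of the list lies in [1, length]
theorem counts_mem_range (tangerine : List Int) (c : Int)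
    (hc : c ∈ (PySem.Dict.counter tangerine).values) :
    0 < c ∧ c ≤ (tangerine.length : Int) := by
  have : ∃ v ∈ tangerine, c = (tangerine.count v : Int) := by
    simp only [PySem.Dict.values, PySem.Dict.items_counter, List.map_map, List.mem_map,
      Function.comp] at hc
    rcases hc with ⟨v, hv, he⟩
    exact ⟨v, (PySem.Set.mem_ofList tangerine v).mp hv, he.symm⟩
  rcases this with ⟨v, hvmem, rfl⟩
  constructor
  · exact_mod_cast List.count_pos_iff.mpr hvmem
  · exact_mod_cast List.count_le_length (a := v) (l := tangerine)

-- the main argument: both programs run pvGreedy over the SAME descending list of counts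
theorem solution_eq_alt (k : Int) (tangerine : List Int) :
    solution k tangerine = solution_alt k tangerine := by
  -- names
  set cnt := PySem.Dict.counter tangerine with hcnt
  set prs := PySem.List.sorted cnt.items (fun x => x.2) true with hprs
  set cs := cnt.values with hcs
  set n : Int := (tangerine.length : Int) with hn
  -- A side
  have hprsnodup : (prs.map (·.1)).Nodup := by
    have hperm : (prs.map (·.1)).Perm (cnt.items.map (·.1)) :=
      (PySem.List.sorted_perm cnt.items (fun x => x.2) true).map _
    exact hperm.nodup_iff.mpr (PySem.Dict.nodup_keys_counter tangerine)
  have hitems : (PySem.Dict.ofList prs).items = prs := items_ofList_of_nodup_fst prs hprsnodup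
  have hkeys : (PySem.Dict.ofList prs).keys = prs.map (·.1) := by
    simp [PySem.Dict.keys, hitems]
  have hA : solution k tangerine = pvGreedy k 0 (prs.map (·.2)) := by
    show solutionLoopA (PySem.Dict.ofList (PySem.List.sorted
      ((tangerine.foldl (fun d i => if d.contains i then d.insert i (d.getD i 0 + 1)
        else d.insert i 1) PySem.Dict.empty).items) (fun x => x.2) true)) _ k 0 = _
    rw [foldA_eq_counter, ← hcnt, ← hprs, hkeys]
    exact solutionLoopA_eq_pvGreedy _ prs
      (fun p hp => PySem.Dict.getD_of_mem_items _ (by rw [hitems]; simpa using hp)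
        (by rw [PySem.Dict.keys, hitems]; exact hprsnodup) 0) k 0
  -- B side
  have hB : solution_alt k tangerine =
      pvGreedy k 0 ((PySem.List.pyRange n 0 (-1)).flatMap fun f => List.replicate (cs.count f) f) := by
    show solutionOuterB _ _ k 0 = _
    simp only [PySem.Dict.foldl_insert_getD_add_one_eq_counter]
    rw [← hcnt, ← hcs, ← hn, solutionOuterB_eq_pvGreedy]
    simp only [PySem.Dict.getD_counter, Int.toNat_natCast]
  -- the two frequency lists coincide
  have hrange_nodup : (PySem.List.pyRange n 0 (-1)).Nodup :=
    List.Pairwise.imp (fun h => ne_of_gt h) (pairwise_gt_pyRange_countdown n)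
  have hcsmem : ∀ c ∈ cs, c ∈ PySem.List.pyRange n 0 (-1) := by
    intro c hc
    have := counts_mem_range tangerine c hc
    rw [PySem.List.mem_pyRange_neg_one]
    exact ⟨this.1, this.2⟩
  have hpermB : ((PySem.List.pyRange n 0 (-1)).flatMap fun f => List.replicate (cs.count f) f).Perm cs :=
    perm_flatMap_replicate _ cs hrange_nodup hcsmem
  have hpermA : (prs.map (·.2)).Perm cs :=
    (PySem.List.sorted_perm cnt.items (fun x => x.2) true).map _
  have hpwA : (prs.map (·.2)).Pairwise (fun a b => b ≤ a) :=
    List.pairwise_map.mpr (PySem.List.sorted_pairwise_rev cnt.items (fun x => x.2))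
  have hpwB : ((PySem.List.pyRange n 0 (-1)).flatMap fun f =>
      List.replicate (cs.count f) f).Pairwise (fun a b => b ≤ a) :=
    pairwise_flatMap_replicate _ _ (pairwise_gt_pyRange_countdown n)
  have hlists : prs.map (·.2) =
      (PySem.List.pyRange n 0 (-1)).flatMap fun f => List.replicate (cs.count f) f := by
    refine PySem.List.eq_of_perm_of_pairwise_le_of_injective (fun x : Int => -x)
      neg_injective (hpermA.trans hpermB.symm) ?_ ?_
    · exact hpwA.imp (fun h => by simpa using neg_le_neg h)
    · exact hpwB.imp (fun h => by simpa using neg_le_neg h)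
  rw [hA, hB, hlists]

-- ===== VERDICT (by name: the statement is the Claim_ definition above) =====
theorem solution_spec : Claim_equal_solution := by
  intro k tangerine _
  unfold Spec_solution
  exact solution_eq_alt k tangerine
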